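-- pv_equiv track=rewrite | github.com/Poonam2801/AISearch-MatchEngine | v8.py | parse_keywords_from_text
-- ===== SOURCE A (Python) =====
-- from typing import List, Dict, Tuple, Optional
--
-- def parse_keywords_from_text(keywords_text: str) -> List[str]:
--     """Parse keywords from text input (comma or newline separated)"""
--     if not keywords_text.strip():
--         return []
--
--     keywords = []
--     # Split by lines first, then by commas
--     lines = keywords_text.strip().split('\n')
--     for line in lines:
--         if ',' in line:
--             keywords.extend([kw.strip() for kw in line.split(',') if kw.strip()])
--         else:
--             if line.strip():
--                 keywords.append(line.strip())
--
--     # Remove duplicates and empty strings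
--     keywords = list(set([kw for kw in keywords if kw]))
--     return keywords
-- ===== SOURCE B (Python) =====
-- from typing import List
--
--
-- def parse_keywords_from_text(keywords_text: str) -> List[str]:
--     """Parse keywords from text input (comma or newline separated)"""
--     tokens = keywords_text.replace('\n', ',').split(',')
--     return list({t.strip() for t in tokens if t.strip()})
-- ===== Notes on version B (the rewrite author's own statement) =====
-- stated objective: simpler
-- what changed: A strips the text, splits it into lines and branches per line on whether a comma is present; B collapses this into one uniform tokenization (replace newlines by commas, split once on commas, then strip/filter/dedupe the tokens), and the separate empty-text guard disappears.
import Mathlib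
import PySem

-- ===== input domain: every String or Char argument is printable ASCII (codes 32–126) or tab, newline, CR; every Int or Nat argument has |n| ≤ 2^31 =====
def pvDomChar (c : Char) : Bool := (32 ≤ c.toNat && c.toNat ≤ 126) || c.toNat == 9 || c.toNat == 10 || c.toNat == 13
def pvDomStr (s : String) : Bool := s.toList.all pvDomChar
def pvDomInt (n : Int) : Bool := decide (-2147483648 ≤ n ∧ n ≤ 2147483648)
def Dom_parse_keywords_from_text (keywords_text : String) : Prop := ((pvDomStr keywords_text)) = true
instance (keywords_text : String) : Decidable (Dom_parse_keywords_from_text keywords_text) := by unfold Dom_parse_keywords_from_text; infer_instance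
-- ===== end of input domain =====

-- B collapses A's per-line comma branching into one uniform tokenization: replace newlines by commas,
-- split once on commas, strip/filter/dedupe — a simpler single-pass decomposition of the same parsing.


-- ===== PORT A =====
def parse_keywords_from_text (keywords_text : String) : List String :=
  if PySem.Chars.strip keywords_text.toList = [] then []
  else
    let lines := PySem.Chars.splitOn (PySem.Chars.strip keywords_text.toList) ['\n']
    let keywords := lines.foldl (fun acc line =>
      if PySem.Chars.isIn [','] line then
        acc ++ ((PySem.Chars.splitOn line [',']).filter
                  (fun kw => PySem.Chars.strip kw ≠ [])).map PySem.Chars.strip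
      else
        if PySem.Chars.strip line ≠ [] then acc ++ [PySem.Chars.strip line] else acc) []
    PySem.Set.ofList ((keywords.filter (fun kw => kw ≠ [])).map String.ofList)

-- ===== PORT B =====
def parse_keywords_from_text_alt (keywords_text : String) : List String :=
  let tokens := PySem.Chars.splitOn (PySem.Chars.replace keywords_text.toList ['\n'] [',']) [',']
  PySem.Set.ofList (((tokens.filter
      (fun t => PySem.Chars.strip t ≠ [])).map PySem.Chars.strip).map String.ofList)

-- ===== PRECONDITION & SPEC =====
def Spec_parse_keywords_from_text (keywords_text : String) (out : List String) : Prop := out = parse_keywords_from_text_alt keywords_text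
instance (keywords_text : String) (out : List String) : Decidable (Spec_parse_keywords_from_text keywords_text out) := by unfold Spec_parse_keywords_from_text; infer_instance

-- ===== CLAIM (what is proved, stated in full; the proofs are below) =====
def Claim_equal_parse_keywords_from_text : Prop := ∀ (keywords_text : String), Dom_parse_keywords_from_text keywords_text → Spec_parse_keywords_from_text keywords_text (parse_keywords_from_text keywords_text)

-- ===== LEMMAS AND PROOFS =====

def pvSep (c : Char) : Bool := c == ',' || c == '\n'
def pvFMG (l : List (List Char)) : List (List Char) :=
  (l.filter (fun x => PySem.Chars.strip x ≠ [])).map PySem.Chars.strip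

def pvSp (p : Char → Bool) : List Char → List Char × List (List Char)
  | [] => ([], [])
  | a :: t => if p a then ([], (pvSp p t).1 :: (pvSp p t).2) else (a :: (pvSp p t).1, (pvSp p t).2)

def pvF (s : List Char) : List (List Char) := pvFMG ((pvSp pvSep s).1 :: (pvSp pvSep s).2)

theorem pvSp_go_eq (c : Char) : ∀ (fuel : Nat) (l cur : List Char) (accs : List (List Char)),
    l.length ≤ fuel →
    PySem.Chars.splitOn.go [c] fuel l cur accs =
      accs.reverse ++ (cur.reverse ++ (pvSp (· == c) l).1) :: (pvSp (· == c) l).2 := by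
  intro fuel
  induction fuel with
  | zero => intro l cur accs h
            have : l = [] := List.eq_nil_of_length_eq_zero (Nat.le_zero.mp h)
            subst this; simp [PySem.Chars.splitOn.go, pvSp]
  | succ n ih =>
    intro l cur accs h
    cases l with
    | nil => simp [PySem.Chars.splitOn.go, pvSp]
    | cons a t =>
      simp only [PySem.Chars.splitOn.go]
      by_cases hc : a = c
      · subst hc
        have hp : List.isPrefixOf [a] (a :: t) = true := by simp [List.isPrefixOf]
        rw [if_pos hp]
        simp only [List.length] at h
        simp only [List.length_cons, List.length_nil, List.drop_succ_cons, List.drop_zero]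
        rw [ih t [] ((cur.reverse) :: accs) (by omega)]
        simp [pvSp]
      · have hp : List.isPrefixOf [c] (a :: t) = false := by
          simp [List.isPrefixOf]; exact fun h => absurd h.symm hc
        rw [if_neg (by simp [hp])]
        simp only [List.length] at h
        rw [ih t (a :: cur) accs (by omega)]
        simp [pvSp, hc]

theorem pvSplitOn_eq (c : Char) (l : List Char) :
    PySem.Chars.splitOn l [c] = (pvSp (· == c) l).1 :: (pvSp (· == c) l).2 := by
  unfold PySem.Chars.splitOn
  rw [pvSp_go_eq c (l.length + 1) l [] [] (by omega)]
  simp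

theorem pvReplace_eq (a b : Char) (l : List Char) :
    PySem.Chars.replace l [a] [b] = l.map (fun x => if x == a then b else x) := by
  have go : ∀ (fuel : Nat) (l acc : List Char), l.length ≤ fuel →
      PySem.Chars.replace.go [a] [b] fuel l acc =
        acc.reverse ++ l.map (fun x => if x == a then b else x) := by
    intro fuel
    induction fuel with
    | zero => intro l acc h
              have : l = [] := List.eq_nil_of_length_eq_zero (Nat.le_zero.mp h)
              subst this; simp [PySem.Chars.replace.go]
    | succ n ih =>
      intro l acc h
      cases l with
      | nil => simp [PySem.Chars.replace.go]
      | cons x t =>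
        simp only [PySem.Chars.replace.go]
        simp only [List.length] at h
        by_cases hx : x = a
        · subst hx
          rw [if_pos (by simp [List.isPrefixOf])]
          simp only [List.length_cons, List.length_nil, List.drop_succ_cons, List.drop_zero]
          rw [ih t _ (by omega)]; simp
        · rw [if_neg (by simp [List.isPrefixOf]; exact fun h => absurd h.symm hx)]
          rw [ih t _ (by omega)]; simp [hx]
  unfold PySem.Chars.replace
  simp only [List.isEmpty_cons, Bool.false_eq_true, if_false]
  rw [go l.length l [] (le_refl _)]
  simp

theorem pvSp_subst (l : List Char) :
    pvSp (· == ',') (l.map (fun x => if x == '\n' then ',' else x)) = pvSp pvSep l := by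
  induction l with
  | nil => rfl
  | cons a t ih =>
    simp only [List.map_cons, pvSp, ih, pvSep]
    by_cases h : a = '\n'
    · subst h; simp
    · simp only [beq_iff_eq, h, if_false]
      by_cases h2 : a = ','
      · subst h2; simp
      · simp [h, h2]

theorem pvNested (s : List Char) :
    ((pvSp (· == '\n') s).1 :: (pvSp (· == '\n') s).2).flatMap
        (fun l => (pvSp (· == ',') l).1 :: (pvSp (· == ',') l).2) =
      (pvSp pvSep s).1 :: (pvSp pvSep s).2 := by
  induction s with
  | nil => rfl
  | cons a t ih =>
    by_cases h : a = '\n'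
    · subst h
      simp only [pvSp, pvSep, beq_self_eq_true, Bool.or_true, if_true, List.flatMap_cons] at *
      simpa using ih
    · by_cases h2 : a = ','
      · subst h2
        simp only [pvSp, pvSep, beq_iff_eq, h, if_false, beq_self_eq_true, Bool.true_or, if_true,
          List.flatMap_cons] at *
        rw [← ih]; simp [List.flatMap_cons]
      · have e1 : pvSp (· == '\n') (a :: t) = (a :: (pvSp (· == '\n') t).1, (pvSp (· == '\n') t).2) := by
          rw [pvSp, if_neg (by simp [h])]
        have e2 : pvSp pvSep (a :: t) = (a :: (pvSp pvSep t).1, (pvSp pvSep t).2) := by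
          rw [pvSp, if_neg (by simp [pvSep, h, h2])]
        have e3 : pvSp (· == ',') (a :: (pvSp (· == '\n') t).1) =
            (a :: (pvSp (· == ',') (pvSp (· == '\n') t).1).1, (pvSp (· == ',') (pvSp (· == '\n') t).1).2) := by
          rw [pvSp, if_neg (by simp [h2])]
        obtain ⟨ih1, ih2⟩ := List.cons.inj (by simpa [List.flatMap_cons] using ih)
        rw [e1, e2]
        simp only [List.flatMap_cons, e3]
        simp [ih1, ih2]

theorem pvSp_no_sep (p : Char → Bool) (l : List Char) (h : ∀ c ∈ l, p c = false) :
    pvSp p l = (l, []) := by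
  induction l with
  | nil => rfl
  | cons a t ih =>
    rw [pvSp]
    rw [ih (fun c hc => h c (by simp [hc])), h a (by simp)]
    simp

theorem pvStrip_cons_ws (a : Char) (x : List Char) (h : PySem.Chars.isspace a = true) :
    PySem.Chars.strip (a :: x) = PySem.Chars.strip x := by
  simp [PySem.Chars.strip, PySem.Chars.lstrip, List.dropWhile_cons, h]

theorem pvStrip_append_ws (x w : List Char) (h : w.all PySem.Chars.isspace = true) :
    PySem.Chars.strip (x ++ w) = PySem.Chars.strip x := by
  simp only [PySem.Chars.strip, PySem.Chars.lstrip, PySem.Chars.rstrip]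
  rw [List.dropWhile_append]
  by_cases he : (List.dropWhile PySem.Chars.isspace x).isEmpty
  · rw [if_pos he]
    have hx : List.dropWhile PySem.Chars.isspace x = [] := by simpa [List.isEmpty_iff] using he
    rw [hx]
    simp only [List.reverse_nil, List.dropWhile_nil]
    have : List.dropWhile PySem.Chars.isspace w = [] := by
      rw [List.dropWhile_eq_nil_iff]
      intro c hc; exact (List.all_eq_true.mp h) c hc
    rw [this]; rfl
  · rw [if_neg he]
    rw [List.reverse_append, List.dropWhile_append]
    have : List.dropWhile PySem.Chars.isspace w.reverse = [] := by
      rw [List.dropWhile_eq_nil_iff]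
      intro c hc; exact (List.all_eq_true.mp h) c (by simpa using hc)
    rw [this]; simp

theorem pvAllws_strip (w : List Char) (h : w.all PySem.Chars.isspace = true) :
    PySem.Chars.strip w = [] := by
  have := pvStrip_append_ws [] w h
  simpa [PySem.Chars.strip, PySem.Chars.lstrip, PySem.Chars.rstrip] using this

theorem pvSp_allws (w : List Char) (h : w.all PySem.Chars.isspace = true) :
    (pvSp pvSep w).1.all PySem.Chars.isspace = true ∧
      ∀ x ∈ (pvSp pvSep w).2, x.all PySem.Chars.isspace = true := by
  induction w with
  | nil => simp [pvSp]
  | cons a t ih =>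
    simp only [List.all_cons, Bool.and_eq_true] at h
    obtain ⟨ha, ht⟩ := h
    obtain ⟨ih1, ih2⟩ := ih ht
    by_cases hp : pvSep a = true
    · simp only [pvSp, hp, if_true]
      refine ⟨rfl, ?_⟩
      intro x hx
      rcases List.mem_cons.mp hx with h | h
      · subst h; exact ih1
      · exact ih2 x h
    · simp only [pvSp, hp, if_false]
      exact ⟨by simp [ha, ih1], ih2⟩

theorem pvFMG_cons (x : List Char) (l : List (List Char)) :
    pvFMG (x :: l) = (if PySem.Chars.strip x ≠ [] then [PySem.Chars.strip x] else []) ++ pvFMG l := by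
  by_cases h : PySem.Chars.strip x = [] <;> simp [pvFMG, List.filter_cons, h]

theorem pvSp_append_ws (t w : List Char) (h : w.all PySem.Chars.isspace = true) :
    (∃ u, (pvSp pvSep (t ++ w)).1 = (pvSp pvSep t).1 ++ u ∧ u.all PySem.Chars.isspace = true) ∧
      pvFMG (pvSp pvSep (t ++ w)).2 = pvFMG (pvSp pvSep t).2 := by
  induction t with
  | nil =>
    constructor
    · exact ⟨(pvSp pvSep w).1, by simp [pvSp], (pvSp_allws w h).1⟩
    · simp only [List.nil_append, pvSp]
      have h2 := (pvSp_allws w h).2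
      have : ∀ l : List (List Char), (∀ x ∈ l, x.all PySem.Chars.isspace = true) → pvFMG l = [] := by
        intro l
        induction l with
        | nil => intro _; rfl
        | cons x r ihl =>
          intro hl
          rw [pvFMG_cons, ihl (fun y hy => hl y (by simp [hy]))]
          simp [pvAllws_strip x (hl x (by simp))]
      rw [this _ h2]; rfl
  | cons a t ih =>
    obtain ⟨⟨u, hu1, hu2⟩, ih2⟩ := ih
    by_cases hp : pvSep a = true
    · simp only [List.cons_append, pvSp, hp, if_true]
      refine ⟨⟨[], by simp, by simp⟩, ?_⟩
      rw [pvFMG_cons, pvFMG_cons, ih2, hu1, pvStrip_append_ws _ u hu2]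
    · simp only [List.cons_append, pvSp, hp, if_false]
      exact ⟨⟨u, by simp [hu1], hu2⟩, ih2⟩

theorem pvF_append_ws (t w : List Char) (h : w.all PySem.Chars.isspace = true) :
    pvF (t ++ w) = pvF t := by
  obtain ⟨⟨u, hu1, hu2⟩, h2⟩ := pvSp_append_ws t w h
  simp only [pvF, pvFMG_cons, h2, hu1, pvStrip_append_ws _ u hu2]

theorem pvF_cons_ws (a : Char) (t : List Char) (h : PySem.Chars.isspace a = true) :
    pvF (a :: t) = pvF t := by
  by_cases hp : pvSep a = true
  · have hstrip : PySem.Chars.strip ([] : List Char) = [] := rfl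
    simp only [pvF, pvSp, hp, if_true, pvFMG_cons, hstrip]
    simp
  · simp only [pvF, pvSp, hp]
    simp [pvFMG_cons, pvStrip_cons_ws a _ h]

theorem pvF_lstrip (s : List Char) : pvF (PySem.Chars.lstrip s) = pvF s := by
  induction s with
  | nil => rfl
  | cons a t ih =>
    by_cases h : PySem.Chars.isspace a = true
    · rw [show PySem.Chars.lstrip (a :: t) = PySem.Chars.lstrip t by
        simp [PySem.Chars.lstrip, List.dropWhile_cons, h]]
      rw [ih, pvF_cons_ws a t h]
    · rw [show PySem.Chars.lstrip (a :: t) = a :: t by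
        simp [PySem.Chars.lstrip, List.dropWhile_cons, h]]

theorem pvF_strip (s : List Char) : pvF (PySem.Chars.strip s) = pvF s := by
  have hr : ∀ y : List Char, pvF (PySem.Chars.rstrip y) = pvF y := by
    intro y
    have hdecomp : y = PySem.Chars.rstrip y ++ (y.reverse.takeWhile PySem.Chars.isspace).reverse := by
      simp only [PySem.Chars.rstrip]
      rw [← List.reverse_append, List.takeWhile_append_dropWhile, List.reverse_reverse]
    have hws : ((y.reverse.takeWhile PySem.Chars.isspace).reverse).all PySem.Chars.isspace = true := by
      rw [List.all_eq_true]
      intro c hc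
      exact List.mem_takeWhile_imp (by simpa using hc)
    conv_rhs => rw [hdecomp]
    rw [pvF_append_ws _ _ hws]
  rw [PySem.Chars.strip, hr, pvF_lstrip]

theorem pvB_tokens (s : List Char) :
    ((PySem.Chars.splitOn (PySem.Chars.replace s ['\n'] [',']) [',']).filter
        (fun t => PySem.Chars.strip t ≠ [])).map PySem.Chars.strip = pvF s := by
  rw [pvReplace_eq, pvSplitOn_eq, pvSp_subst]
  rfl

theorem pvA_branch (line : List Char) :
    (if PySem.Chars.isIn [','] line then
        ((PySem.Chars.splitOn line [',']).filter
            (fun kw => PySem.Chars.strip kw ≠ [])).map PySem.Chars.strip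
      else
        if PySem.Chars.strip line ≠ [] then [PySem.Chars.strip line] else []) =
    pvFMG ((pvSp (· == ',') line).1 :: (pvSp (· == ',') line).2) := by
  by_cases h : PySem.Chars.isIn [','] line = true
  · rw [if_pos h, pvSplitOn_eq]
    rfl
  · rw [if_neg h]
    have hmem : (',' : Char) ∉ line := by
      intro hm
      exact h ((PySem.Chars.isIn_iff_infix [','] line).mpr ((List.singleton_infix_iff ',' line).mpr hm))
    rw [pvSp_no_sep (· == ',') line (by intro c hc; simp; intro he; exact hmem (he ▸ hc))]
    rw [pvFMG_cons]
    simp [pvFMG]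

theorem pvA_tokens (s : List Char) :
    (PySem.Chars.splitOn (PySem.Chars.strip s) ['\n']).foldl (fun acc line =>
      if PySem.Chars.isIn [','] line then
        acc ++ ((PySem.Chars.splitOn line [',']).filter
                  (fun kw => PySem.Chars.strip kw ≠ [])).map PySem.Chars.strip
      else
        if PySem.Chars.strip line ≠ [] then acc ++ [PySem.Chars.strip line] else acc) [] =
    pvF (PySem.Chars.strip s) := by
  have hfold : ∀ (lines : List (List Char)) (acc : List (List Char)),
      lines.foldl (fun acc line =>
        if PySem.Chars.isIn [','] line then
          acc ++ ((PySem.Chars.splitOn line [',']).filter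
                    (fun kw => PySem.Chars.strip kw ≠ [])).map PySem.Chars.strip
        else
          if PySem.Chars.strip line ≠ [] then acc ++ [PySem.Chars.strip line] else acc) acc =
      acc ++ lines.flatMap (fun line => pvFMG ((pvSp (· == ',') line).1 :: (pvSp (· == ',') line).2)) := by
    intro lines
    induction lines with
    | nil => intro acc; simp
    | cons l r ih =>
      intro acc
      rw [List.foldl_cons, List.flatMap_cons]
      have hbody : (if PySem.Chars.isIn [','] l then
          acc ++ ((PySem.Chars.splitOn l [',']).filter
                    (fun kw => PySem.Chars.strip kw ≠ [])).map PySem.Chars.strip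
        else
          if PySem.Chars.strip l ≠ [] then acc ++ [PySem.Chars.strip l] else acc) =
          acc ++ pvFMG ((pvSp (· == ',') l).1 :: (pvSp (· == ',') l).2) := by
        rw [← pvA_branch l]
        by_cases h : PySem.Chars.isIn [','] l = true
        · rw [if_pos h, if_pos h]
        · rw [if_neg h, if_neg h]
          by_cases h2 : PySem.Chars.strip l = []
          · simp [h2]
          · simp [h2]
      rw [hbody, ih, List.append_assoc]
  rw [hfold, pvSplitOn_eq]
  have hnest := congrArg pvFMG (pvNested (PySem.Chars.strip s))
  have aux : ∀ (L : List (List Char)) (f : List Char → List (List Char)),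
      pvFMG (L.flatMap f) = L.flatMap (fun x => pvFMG (f x)) := by
    intro L f
    unfold pvFMG
    rw [List.filter_flatMap, List.map_flatMap]
  rw [List.nil_append, ← aux, hnest]
  rfl

theorem pvFMG_ne_nil (l : List (List Char)) (x : List Char) (hx : x ∈ pvFMG l) : x ≠ [] := by
  simp only [pvFMG, List.mem_map, List.mem_filter] at hx
  obtain ⟨y, ⟨_, hy⟩, rfl⟩ := hx
  simpa using hy

-- ===== VERDICT (by name: the statement is the Claim_ definition above) =====
theorem parse_keywords_from_text_spec : Claim_equal_parse_keywords_from_text := by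
  intro s _
  unfold Spec_parse_keywords_from_text parse_keywords_from_text parse_keywords_from_text_alt
  dsimp only
  rw [pvB_tokens s.toList, ← pvF_strip s.toList]
  by_cases h : PySem.Chars.strip s.toList = []
  · rw [if_pos h, h]
    rfl
  · rw [if_neg h, pvA_tokens s.toList]
    have hfilter : (pvF (PySem.Chars.strip s.toList)).filter (fun kw => kw ≠ []) =
        pvF (PySem.Chars.strip s.toList) := by
      rw [List.filter_eq_self]
      intro x hx
      simpa using pvFMG_ne_nil _ x hx
    rw [hfilter]
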